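-- pv_equiv track=rewrite | github.com/somabencsik/AoC2024 | Day8/task2.py | get_every_antinode_on_vector
-- ===== SOURCE A (Python) =====
-- def get_every_antinode_on_vector(
--     start_i: int, start_j: int, change_i: int, change_j: int, max_i: int, max_j: int
-- ) -> list[tuple[int, int]]:
--     antinodes = []
--     new_point = (start_i, start_j)
--     while (
--         new_point[0] + change_i >= 0
--         and new_point[0] + change_i < max_j
--         and new_point[1] + change_j >= 0
--         and new_point[1] + change_j < max_i
--     ):
--         antinodes.append(new_point)
--         new_point = (new_point[0] + change_i, new_point[1] + change_j)
--         antinodes.append(new_point)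
--     new_point = (start_i, start_j)
--     while (
--         new_point[0] - change_i >= 0
--         and new_point[0] - change_i < max_j
--         and new_point[1] - change_j >= 0
--         and new_point[1] - change_j < max_i
--     ):
--         antinodes.append(new_point)
--         new_point = (new_point[0] - change_i, new_point[1] - change_j)
--         antinodes.append(new_point)
--     return antinodes
-- ===== SOURCE B (Python) =====
-- def get_every_antinode_on_vector(
--     start_i: int, start_j: int, change_i: int, change_j: int, max_i: int, max_j: int
-- ) -> list[tuple[int, int]]:
--     # Closed form: compute the number of loop steps per direction by floor
--     # division, then generate the doubled point list directly by arithmetic.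
--     def steps(ci, cj):
--         if not (0 <= start_i + ci < max_j and 0 <= start_j + cj < max_i):
--             return 0
--         bounds = []
--         if ci > 0:
--             bounds.append((max_j - 1 - start_i) // ci)
--         elif ci < 0:
--             bounds.append(start_i // (-ci))
--         if cj > 0:
--             bounds.append((max_i - 1 - start_j) // cj)
--         elif cj < 0:
--             bounds.append(start_j // (-cj))
--         return min(bounds)
--
--     out = []
--     for ci, cj in ((change_i, change_j), (-change_i, -change_j)):
--         k = steps(ci, cj)
--         out += [p for t in range(k)
--                   for p in ((start_i + t * ci, start_j + t * cj),
--                             (start_i + (t + 1) * ci, start_j + (t + 1) * cj))]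
--     return out
-- ===== Notes on version B (the rewrite author's own statement) =====
-- stated objective: alternative
-- what changed: B replaces A's step-by-step while loops by a closed-form floor-division computation of the iteration count per direction, then generates the doubled point list directly by arithmetic over a range.
-- outside the precondition, e.g. on get_every_antinode_on_vector(1, 1, 0, 0, 3, 3): A does not finish within the time limit, B raises ValueError
import Mathlib
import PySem

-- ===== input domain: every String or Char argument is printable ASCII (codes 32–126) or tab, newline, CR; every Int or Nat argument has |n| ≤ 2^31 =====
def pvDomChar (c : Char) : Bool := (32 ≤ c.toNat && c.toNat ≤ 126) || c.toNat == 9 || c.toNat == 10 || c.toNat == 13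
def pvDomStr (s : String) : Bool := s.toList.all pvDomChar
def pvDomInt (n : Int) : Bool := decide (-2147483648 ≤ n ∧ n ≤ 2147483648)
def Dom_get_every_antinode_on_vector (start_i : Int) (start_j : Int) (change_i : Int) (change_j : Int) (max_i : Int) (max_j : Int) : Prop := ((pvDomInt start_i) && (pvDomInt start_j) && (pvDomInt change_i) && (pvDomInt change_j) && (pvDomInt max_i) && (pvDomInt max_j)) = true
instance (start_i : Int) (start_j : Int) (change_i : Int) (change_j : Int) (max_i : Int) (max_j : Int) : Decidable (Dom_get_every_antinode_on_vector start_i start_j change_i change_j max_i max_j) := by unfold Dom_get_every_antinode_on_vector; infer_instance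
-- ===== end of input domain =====

-- B replaces A's step-by-step while loops by a closed-form floor-division step
-- count per direction and direct arithmetic generation of the doubled points.

-- ===== PORT A =====
-- A's single while loop (both directions share it, the backward one passes the
-- negated change): appends the current point and the stepped point each
-- iteration. Fuel bounds the iteration count; under Pre_ it never runs out.
def pvLoopA (ci cj mi mj : Int) : Nat → Int × Int → List (Int × Int) → List (Int × Int)
  | 0, _, acc => acc
  | n+1, p, acc =>
    if p.1 + ci ≥ 0 ∧ p.1 + ci < mj ∧ p.2 + cj ≥ 0 ∧ p.2 + cj < mi then
      pvLoopA ci cj mi mj n (p.1 + ci, p.2 + cj) (acc ++ [p, (p.1 + ci, p.2 + cj)])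
    else acc

def get_every_antinode_on_vector (start_i : Int) (start_j : Int) (change_i : Int) (change_j : Int) (max_i : Int) (max_j : Int) : List (Int × Int) :=
  pvLoopA (-change_i) (-change_j) max_i max_j (max_i.toNat + max_j.toNat + 1) (start_i, start_j)
    (pvLoopA change_i change_j max_i max_j (max_i.toNat + max_j.toNat + 1) (start_i, start_j) [])

-- ===== PORT B =====
-- Source B's `steps`: the closed-form iteration count of one direction; Python's
-- `min(bounds)` raises on an empty list (only reachable outside Pre_, where
-- ci = cj = 0 and the start is inside); `.getD 0` stands in for that there.
def pvStepsB (start_i start_j max_i max_j ci cj : Int) : Int :=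
  if 0 ≤ start_i + ci ∧ start_i + ci < max_j ∧ 0 ≤ start_j + cj ∧ start_j + cj < max_i then
    (PySem.List.min?
      ((if 0 < ci then [PySem.Int.floordiv (max_j - 1 - start_i) ci]
        else if ci < 0 then [PySem.Int.floordiv start_i (-ci)] else []) ++
       (if 0 < cj then [PySem.Int.floordiv (max_i - 1 - start_j) cj]
        else if cj < 0 then [PySem.Int.floordiv start_j (-cj)] else []))
      (fun x => x)).getD 0
  else 0

-- Source B's comprehension: the doubled point list of one direction, generated
-- directly by arithmetic from the step count.
def pvEmitDir (start_i start_j ci cj k : Int) : List (Int × Int) :=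
  (PySem.List.pyRange 0 k 1).flatMap (fun t =>
    [(start_i + t * ci, start_j + t * cj),
     (start_i + (t + 1) * ci, start_j + (t + 1) * cj)])

def get_every_antinode_on_vector_alt (start_i : Int) (start_j : Int) (change_i : Int) (change_j : Int) (max_i : Int) (max_j : Int) : List (Int × Int) :=
  pvEmitDir start_i start_j change_i change_j
      (pvStepsB start_i start_j max_i max_j change_i change_j) ++
  pvEmitDir start_i start_j (-change_i) (-change_j)
      (pvStepsB start_i start_j max_i max_j (-change_i) (-change_j))

-- ===== PRECONDITION & SPEC =====
-- Pre_ excludes exactly the inputs on which Python A loops forever: a zero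
-- change vector with the start point inside the (swapped) bounds.
def Pre_get_every_antinode_on_vector (start_i : Int) (start_j : Int) (change_i : Int) (change_j : Int) (max_i : Int) (max_j : Int) : Prop :=
  ¬ (change_i = 0 ∧ change_j = 0 ∧ 0 ≤ start_i ∧ start_i < max_j ∧ 0 ≤ start_j ∧ start_j < max_i)
instance (start_i : Int) (start_j : Int) (change_i : Int) (change_j : Int) (max_i : Int) (max_j : Int) : Decidable (Pre_get_every_antinode_on_vector start_i start_j change_i change_j max_i max_j) := by unfold Pre_get_every_antinode_on_vector; infer_instance

def pvWitness_get_every_antinode_on_vector : Int × Int × Int × Int × Int × Int := (0, 0, 1, 1, 3, 3)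

def Spec_get_every_antinode_on_vector (start_i : Int) (start_j : Int) (change_i : Int) (change_j : Int) (max_i : Int) (max_j : Int) (out : List (Int × Int)) : Prop := out = get_every_antinode_on_vector_alt start_i start_j change_i change_j max_i max_j
instance (start_i : Int) (start_j : Int) (change_i : Int) (change_j : Int) (max_i : Int) (max_j : Int) (out : List (Int × Int)) : Decidable (Spec_get_every_antinode_on_vector start_i start_j change_i change_j max_i max_j out) := by unfold Spec_get_every_antinode_on_vector; infer_instance

-- ===== CLAIM (what is proved, stated in full; the proofs are below) =====
def Claim_equal_get_every_antinode_on_vector : Prop := ∀ (start_i : Int) (start_j : Int) (change_i : Int) (change_j : Int) (max_i : Int) (max_j : Int), Dom_get_every_antinode_on_vector start_i start_j change_i change_j max_i max_j → Pre_get_every_antinode_on_vector start_i start_j change_i change_j max_i max_j → Spec_get_every_antinode_on_vector start_i start_j change_i change_j max_i max_j (get_every_antinode_on_vector start_i start_j change_i change_j max_i max_j)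

-- ===== LEMMAS AND PROOFS =====

-- facts about the closed-form bound for a positive step component
theorem pvPosFacts (c M s : Int) (hc : 0 < c) (h0 : 0 ≤ s + c) (h1 : s + c < M) :
    1 ≤ PySem.Int.floordiv (M - 1 - s) c ∧ PySem.Int.floordiv (M - 1 - s) c ≤ M ∧
    (∀ t : Int, 1 ≤ t → t ≤ PySem.Int.floordiv (M - 1 - s) c → 0 ≤ s + t * c ∧ s + t * c < M) ∧
    ¬ (s + (PySem.Int.floordiv (M - 1 - s) c + 1) * c < M) := by
  have hU1 : 1 ≤ PySem.Int.floordiv (M - 1 - s) c :=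
    (PySem.Int.le_floordiv_iff_mul_le hc).mpr (by linarith [one_mul c])
  have hMc : M * 1 ≤ M * c := mul_le_mul_of_nonneg_left hc (by linarith)
  have hUM : PySem.Int.floordiv (M - 1 - s) c ≤ M := by
    have : PySem.Int.floordiv (M - 1 - s) c < M + 1 :=
      (PySem.Int.floordiv_lt_iff_lt_mul hc).mpr (by nlinarith)
    omega
  refine ⟨hU1, hUM, ?_, ?_⟩
  · intro t ht1 ht2
    have hub : t * c ≤ M - 1 - s := (PySem.Int.le_floordiv_iff_mul_le hc).mp ht2
    have hlb : 1 * c ≤ t * c := mul_le_mul_of_nonneg_right ht1 (le_of_lt hc)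
    constructor <;> nlinarith
  · intro hcon
    have : PySem.Int.floordiv (M - 1 - s) c + 1 ≤ PySem.Int.floordiv (M - 1 - s) c :=
      (PySem.Int.le_floordiv_iff_mul_le hc).mpr (by nlinarith)
    omega

-- facts about the closed-form bound for a negative step component
theorem pvNegFacts (c M s : Int) (hc : c < 0) (h0 : 0 ≤ s + c) (h1 : s + c < M) :
    1 ≤ PySem.Int.floordiv s (-c) ∧ PySem.Int.floordiv s (-c) ≤ M ∧
    (∀ t : Int, 1 ≤ t → t ≤ PySem.Int.floordiv s (-c) → 0 ≤ s + t * c ∧ s + t * c < M) ∧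
    ¬ (0 ≤ s + (PySem.Int.floordiv s (-c) + 1) * c) := by
  have hd : (0:Int) < -c := by omega
  have hU1 : 1 ≤ PySem.Int.floordiv s (-c) :=
    (PySem.Int.le_floordiv_iff_mul_le hd).mpr (by linarith [one_mul (-c)])
  have hMc : M * 1 ≤ M * (-c) := mul_le_mul_of_nonneg_left hd (by linarith)
  have hUM : PySem.Int.floordiv s (-c) ≤ M := by
    have : PySem.Int.floordiv s (-c) < M + 1 :=
      (PySem.Int.floordiv_lt_iff_lt_mul hd).mpr (by nlinarith)
    omega
  refine ⟨hU1, hUM, ?_, ?_⟩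
  · intro t ht1 ht2
    have hub : t * (-c) ≤ s := (PySem.Int.le_floordiv_iff_mul_le hd).mp ht2
    have hlb : 1 * (-c) ≤ t * (-c) := mul_le_mul_of_nonneg_right ht1 (le_of_lt hd)
    constructor <;> nlinarith
  · intro hcon
    have : PySem.Int.floordiv s (-c) + 1 ≤ PySem.Int.floordiv s (-c) :=
      (PySem.Int.le_floordiv_iff_mul_le hd).mpr (by nlinarith)
    omega

-- pvStepsB is the exact iteration count of A's loop in its direction
theorem pvStepsB_spec (si sj ci cj mi mj : Int)
    (H : ¬ (ci = 0 ∧ cj = 0 ∧ 0 ≤ si + ci ∧ si + ci < mj ∧ 0 ≤ sj + cj ∧ sj + cj < mi)) :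
    0 ≤ pvStepsB si sj mi mj ci cj ∧
    (pvStepsB si sj mi mj ci cj).toNat ≤ mi.toNat + mj.toNat ∧
    (∀ t : Int, 1 ≤ t → t ≤ pvStepsB si sj mi mj ci cj →
        0 ≤ si + t * ci ∧ si + t * ci < mj ∧ 0 ≤ sj + t * cj ∧ sj + t * cj < mi) ∧
    ¬ (0 ≤ si + (pvStepsB si sj mi mj ci cj + 1) * ci ∧
       si + (pvStepsB si sj mi mj ci cj + 1) * ci < mj ∧
       0 ≤ sj + (pvStepsB si sj mi mj ci cj + 1) * cj ∧
       sj + (pvStepsB si sj mi mj ci cj + 1) * cj < mi) := by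
  by_cases hc0 : 0 ≤ si + ci ∧ si + ci < mj ∧ 0 ≤ sj + cj ∧ sj + cj < mi
  case neg =>
    have hK : pvStepsB si sj mi mj ci cj = 0 := by simp [pvStepsB, hc0]
    rw [hK]
    refine ⟨le_refl 0, by simp, fun t ht1 ht2 => absurd (le_trans ht1 ht2) (by omega), ?_⟩
    simpa using hc0
  case pos =>
  obtain ⟨h0i, h1i, h0j, h1j⟩ := hc0
  have hmi : 1 ≤ mi := by omega
  have hmj : 1 ≤ mj := by omega
  rcases lt_trichotomy ci 0 with hci | hci | hci <;>
    rcases lt_trichotomy cj 0 with hcj | hcj | hcj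
  -- ci < 0, cj < 0
  · obtain ⟨i1, iM, isat, ifail⟩ := pvNegFacts ci mj si hci h0i h1i
    obtain ⟨j1, jM, jsat, jfail⟩ := pvNegFacts cj mi sj hcj h0j h1j
    have hK : pvStepsB si sj mi mj ci cj
        = min (PySem.Int.floordiv si (-ci)) (PySem.Int.floordiv sj (-cj)) := by
      unfold pvStepsB
      rw [if_pos ⟨h0i, h1i, h0j, h1j⟩, if_neg (by omega), if_pos hci,
          if_neg (by omega), if_pos hcj]
      simp [PySem.List.min?_id_cons]
    rw [hK]
    refine ⟨by omega, by omega, ?_, ?_⟩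
    · intro t ht1 ht2
      have hi := isat t ht1 (by omega)
      have hj := jsat t ht1 (by omega)
      exact ⟨hi.1, hi.2, hj.1, hj.2⟩
    · intro hcon
      rcases le_total (PySem.Int.floordiv si (-ci)) (PySem.Int.floordiv sj (-cj)) with h | h
      · rw [min_eq_left h] at hcon; exact ifail hcon.1
      · rw [min_eq_right h] at hcon; exact jfail hcon.2.2.1
  -- ci < 0, cj = 0
  · subst hcj
    obtain ⟨i1, iM, isat, ifail⟩ := pvNegFacts ci mj si hci h0i h1i
    have hK : pvStepsB si sj mi mj ci 0 = PySem.Int.floordiv si (-ci) := by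
      unfold pvStepsB
      rw [if_pos ⟨h0i, h1i, h0j, h1j⟩, if_neg (by omega), if_pos hci,
          if_neg (by omega), if_neg (by omega)]
      simp [PySem.List.min?_id_cons]
    rw [hK]
    refine ⟨by omega, by omega, ?_, ?_⟩
    · intro t ht1 ht2
      have hi := isat t ht1 ht2
      exact ⟨hi.1, hi.2, by simpa using h0j, by simpa using h1j⟩
    · intro hcon; exact ifail hcon.1
  -- ci < 0, 0 < cj
  · obtain ⟨i1, iM, isat, ifail⟩ := pvNegFacts ci mj si hci h0i h1i
    obtain ⟨j1, jM, jsat, jfail⟩ := pvPosFacts cj mi sj hcj h0j h1j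
    have hK : pvStepsB si sj mi mj ci cj
        = min (PySem.Int.floordiv si (-ci)) (PySem.Int.floordiv (mi - 1 - sj) cj) := by
      unfold pvStepsB
      rw [if_pos ⟨h0i, h1i, h0j, h1j⟩, if_neg (by omega), if_pos hci, if_pos hcj]
      simp [PySem.List.min?_id_cons]
    rw [hK]
    refine ⟨by omega, by omega, ?_, ?_⟩
    · intro t ht1 ht2
      have hi := isat t ht1 (by omega)
      have hj := jsat t ht1 (by omega)
      exact ⟨hi.1, hi.2, hj.1, hj.2⟩
    · intro hcon
      rcases le_total (PySem.Int.floordiv si (-ci)) (PySem.Int.floordiv (mi - 1 - sj) cj) with h | h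
      · rw [min_eq_left h] at hcon; exact ifail hcon.1
      · rw [min_eq_right h] at hcon; exact jfail hcon.2.2.2
  -- ci = 0, cj < 0
  · subst hci
    obtain ⟨j1, jM, jsat, jfail⟩ := pvNegFacts cj mi sj hcj h0j h1j
    have hK : pvStepsB si sj mi mj 0 cj = PySem.Int.floordiv sj (-cj) := by
      unfold pvStepsB
      rw [if_pos ⟨h0i, h1i, h0j, h1j⟩, if_neg (by omega), if_neg (by omega),
          if_neg (by omega), if_pos hcj]
      simp [PySem.List.min?_id_cons]
    rw [hK]
    refine ⟨by omega, by omega, ?_, ?_⟩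
    · intro t ht1 ht2
      have hj := jsat t ht1 ht2
      exact ⟨by simpa using h0i, by simpa using h1i, hj.1, hj.2⟩
    · intro hcon; exact jfail hcon.2.2.1
  -- ci = 0, cj = 0 : excluded by H
  · exact absurd ⟨hci, hcj, h0i, h1i, h0j, h1j⟩ H
  -- ci = 0, 0 < cj
  · subst hci
    obtain ⟨j1, jM, jsat, jfail⟩ := pvPosFacts cj mi sj hcj h0j h1j
    have hK : pvStepsB si sj mi mj 0 cj = PySem.Int.floordiv (mi - 1 - sj) cj := by
      unfold pvStepsB
      rw [if_pos ⟨h0i, h1i, h0j, h1j⟩, if_neg (by omega), if_neg (by omega), if_pos hcj]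
      simp [PySem.List.min?_id_cons]
    rw [hK]
    refine ⟨by omega, by omega, ?_, ?_⟩
    · intro t ht1 ht2
      have hj := jsat t ht1 ht2
      exact ⟨by simpa using h0i, by simpa using h1i, hj.1, hj.2⟩
    · intro hcon; exact jfail hcon.2.2.2
  -- 0 < ci, cj < 0
  · obtain ⟨i1, iM, isat, ifail⟩ := pvPosFacts ci mj si hci h0i h1i
    obtain ⟨j1, jM, jsat, jfail⟩ := pvNegFacts cj mi sj hcj h0j h1j
    have hK : pvStepsB si sj mi mj ci cj
        = min (PySem.Int.floordiv (mj - 1 - si) ci) (PySem.Int.floordiv sj (-cj)) := by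
      unfold pvStepsB
      rw [if_pos ⟨h0i, h1i, h0j, h1j⟩, if_pos hci, if_neg (by omega), if_pos hcj]
      simp [PySem.List.min?_id_cons]
    rw [hK]
    refine ⟨by omega, by omega, ?_, ?_⟩
    · intro t ht1 ht2
      have hi := isat t ht1 (by omega)
      have hj := jsat t ht1 (by omega)
      exact ⟨hi.1, hi.2, hj.1, hj.2⟩
    · intro hcon
      rcases le_total (PySem.Int.floordiv (mj - 1 - si) ci) (PySem.Int.floordiv sj (-cj)) with h | h
      · rw [min_eq_left h] at hcon; exact ifail hcon.2.1
      · rw [min_eq_right h] at hcon; exact jfail hcon.2.2.1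
  -- 0 < ci, cj = 0
  · subst hcj
    obtain ⟨i1, iM, isat, ifail⟩ := pvPosFacts ci mj si hci h0i h1i
    have hK : pvStepsB si sj mi mj ci 0 = PySem.Int.floordiv (mj - 1 - si) ci := by
      unfold pvStepsB
      rw [if_pos ⟨h0i, h1i, h0j, h1j⟩, if_pos hci, if_neg (by omega), if_neg (by omega)]
      simp [PySem.List.min?_id_cons]
    rw [hK]
    refine ⟨by omega, by omega, ?_, ?_⟩
    · intro t ht1 ht2
      have hi := isat t ht1 ht2
      exact ⟨hi.1, hi.2, by simpa using h0j, by simpa using h1j⟩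
    · intro hcon; exact ifail hcon.2.1
  -- 0 < ci, 0 < cj
  · obtain ⟨i1, iM, isat, ifail⟩ := pvPosFacts ci mj si hci h0i h1i
    obtain ⟨j1, jM, jsat, jfail⟩ := pvPosFacts cj mi sj hcj h0j h1j
    have hK : pvStepsB si sj mi mj ci cj
        = min (PySem.Int.floordiv (mj - 1 - si) ci) (PySem.Int.floordiv (mi - 1 - sj) cj) := by
      unfold pvStepsB
      rw [if_pos ⟨h0i, h1i, h0j, h1j⟩, if_pos hci, if_pos hcj]
      simp [PySem.List.min?_id_cons]
    rw [hK]
    refine ⟨by omega, by omega, ?_, ?_⟩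
    · intro t ht1 ht2
      have hi := isat t ht1 (by omega)
      have hj := jsat t ht1 (by omega)
      exact ⟨hi.1, hi.2, hj.1, hj.2⟩
    · intro hcon
      rcases le_total (PySem.Int.floordiv (mj - 1 - si) ci) (PySem.Int.floordiv (mi - 1 - sj) cj) with h | h
      · rw [min_eq_left h] at hcon; exact ifail hcon.2.1
      · rw [min_eq_right h] at hcon; exact jfail hcon.2.2.2

-- proof-side normal form of the doubled point list
def pvGen (si sj ci cj : Int) (k : Nat) : List (Int × Int) :=
  (List.range k).flatMap (fun t : Nat =>
    [(si + (t : Int) * ci, sj + (t : Int) * cj),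
     (si + ((t : Int) + 1) * ci, sj + ((t : Int) + 1) * cj)])

theorem pvGen_succ_left (si sj ci cj : Int) (k : Nat) :
    pvGen si sj ci cj (k + 1)
      = (si, sj) :: (si + ci, sj + cj) :: pvGen (si + ci) (sj + cj) ci cj k := by
  unfold pvGen
  rw [List.range_succ_eq_map, List.flatMap_cons, List.flatMap_map]
  simp only [Nat.cast_zero, zero_mul, add_zero, zero_add, one_mul, List.cons_append,
    List.nil_append]
  congr 2
  apply List.flatMap_congr
  intro t _
  push_cast
  ring_nf

-- A's loop, run on the exact iteration count, is the generated list
theorem pvLoopA_gen (ci cj mi mj : Int) (k : Nat) :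
    ∀ (n : Nat) (si sj : Int) (acc : List (Int × Int)),
      k ≤ n →
      (∀ t : Nat, t < k → 0 ≤ si + ((t : Int) + 1) * ci ∧ si + ((t : Int) + 1) * ci < mj ∧
          0 ≤ sj + ((t : Int) + 1) * cj ∧ sj + ((t : Int) + 1) * cj < mi) →
      ¬ (0 ≤ si + ((k : Int) + 1) * ci ∧ si + ((k : Int) + 1) * ci < mj ∧
         0 ≤ sj + ((k : Int) + 1) * cj ∧ sj + ((k : Int) + 1) * cj < mi) →
      pvLoopA ci cj mi mj n (si, sj) acc = acc ++ pvGen si sj ci cj k := by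
  induction k with
  | zero =>
    intro n si sj acc _ _ hfail
    simp only [Nat.cast_zero, zero_add, one_mul] at hfail
    cases n with
    | zero => simp [pvLoopA, pvGen]
    | succ m =>
      rw [pvLoopA, if_neg (by rintro ⟨a, b, c, d⟩; exact hfail ⟨a, b, c, d⟩)]
      simp [pvGen]
  | succ k ih =>
    intro n si sj acc hkn hsat hfail
    cases n with
    | zero => omega
    | succ m =>
      have h0 := hsat 0 (by omega)
      simp only [Nat.cast_zero, zero_add, one_mul] at h0
      rw [pvLoopA, if_pos ⟨h0.1, h0.2.1, h0.2.2.1, h0.2.2.2⟩]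
      rw [ih m (si + ci) (sj + cj) (acc ++ [(si, sj), (si + ci, sj + cj)]) (by omega) ?_ ?_]
      · rw [pvGen_succ_left]
        simp
      · intro t ht
        have h := hsat (t + 1) (by omega)
        push_cast at h ⊢
        ring_nf at h ⊢
        exact h
      · intro hcon
        apply hfail
        push_cast at hcon ⊢
        ring_nf at hcon ⊢
        exact hcon

-- B's pyRange comprehension is the same generated list
theorem pvEmitDir_eq_gen (si sj ci cj K : Int) (_hK : 0 ≤ K) :
    pvEmitDir si sj ci cj K = pvGen si sj ci cj K.toNat := by
  unfold pvEmitDir pvGen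
  rw [PySem.List.pyRange_one, List.flatMap_map]
  simp only [sub_zero]
  apply List.flatMap_congr
  intro t _
  simp

-- ===== VERDICT (by name: the statement is the Claim_ definition above) =====
theorem get_every_antinode_on_vector_spec : Claim_equal_get_every_antinode_on_vector := by
  intro si sj ci cj mi mj _ hpre
  unfold Pre_get_every_antinode_on_vector at hpre
  unfold Spec_get_every_antinode_on_vector get_every_antinode_on_vector
    get_every_antinode_on_vector_alt
  have H1 : ¬ (ci = 0 ∧ cj = 0 ∧ 0 ≤ si + ci ∧ si + ci < mj ∧ 0 ≤ sj + cj ∧ sj + cj < mi) := by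
    rintro ⟨a, b, h1, h2, h3, h4⟩
    exact hpre ⟨a, b, by omega, by omega, by omega, by omega⟩
  have H2 : ¬ (-ci = 0 ∧ -cj = 0 ∧ 0 ≤ si + -ci ∧ si + -ci < mj ∧ 0 ≤ sj + -cj ∧ sj + -cj < mi) := by
    rintro ⟨a, b, h1, h2, h3, h4⟩
    exact hpre ⟨by omega, by omega, by omega, by omega, by omega, by omega⟩
  obtain ⟨f0, fn, fsat, ffail⟩ := pvStepsB_spec si sj ci cj mi mj H1
  obtain ⟨b0, bn, bsat, bfail⟩ := pvStepsB_spec si sj (-ci) (-cj) mi mj H2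
  have ef : ((pvStepsB si sj mi mj ci cj).toNat : Int) = pvStepsB si sj mi mj ci cj :=
    Int.toNat_of_nonneg f0
  have eb : ((pvStepsB si sj mi mj (-ci) (-cj)).toNat : Int) = pvStepsB si sj mi mj (-ci) (-cj) :=
    Int.toNat_of_nonneg b0
  rw [pvLoopA_gen ci cj mi mj (pvStepsB si sj mi mj ci cj).toNat _ si sj [] (by omega)
        (fun t ht => fsat ((t : Int) + 1) (by omega) (by omega))
        (by rw [ef]; exact ffail)]
  rw [pvLoopA_gen (-ci) (-cj) mi mj (pvStepsB si sj mi mj (-ci) (-cj)).toNat _ si sj _ (by omega)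
        (fun t ht => bsat ((t : Int) + 1) (by omega) (by omega))
        (by rw [eb]; exact bfail)]
  rw [pvEmitDir_eq_gen si sj ci cj _ f0, pvEmitDir_eq_gen si sj (-ci) (-cj) _ b0]
  simp
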